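-- pv_equiv track=rewrite | github.com/avmatys/pyleetcode | collection/3356_zeroarraytransfromII/main.py | calc
-- ===== SOURCE A (Python) =====
-- def calc(nums, q, k):
--     n = len(nums)
--     diff = [0] * (n + 1)
--     for i in range(k):
--         l, r, v = q[i]
--         diff[l] += v
--         diff[r+1] -= v
--     curr = 0
--     for i in range(n):
--         curr += diff[i]
--         if nums[i] > curr:
--             return False
--     return True
-- ===== SOURCE B (Python) =====
-- def calc(nums, q, k):
--     n = len(nums)
--     events = []
--     for i in range(k):
--         l, r, v = q[i]
--         events.append((l, v))
--         events.append((r + 1, -v))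
--     events.sort(key=lambda e: e[0])
--     j = 0
--     curr = 0
--     for i, x in enumerate(nums):
--         while j < len(events) and events[j][0] <= i:
--             curr += events[j][1]
--             j += 1
--         if x > curr:
--             return False
--     return True
-- ===== Notes on version B (the rewrite author's own statement) =====
-- stated objective: alternative
-- what changed: Replaced the size-(n+1) difference array and bucketed prefix scan by a sorted (position, delta) event list that is merged with the nums scan in one sweep via a pointer into the event stream.
-- outside the precondition, e.g. on calc([1], [(-1, 0, 5)], 1): A returns False, B returns True; on calc([0, 1], [(0, -2, 3)], 1): A returns True, B returns False
import Mathlib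
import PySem

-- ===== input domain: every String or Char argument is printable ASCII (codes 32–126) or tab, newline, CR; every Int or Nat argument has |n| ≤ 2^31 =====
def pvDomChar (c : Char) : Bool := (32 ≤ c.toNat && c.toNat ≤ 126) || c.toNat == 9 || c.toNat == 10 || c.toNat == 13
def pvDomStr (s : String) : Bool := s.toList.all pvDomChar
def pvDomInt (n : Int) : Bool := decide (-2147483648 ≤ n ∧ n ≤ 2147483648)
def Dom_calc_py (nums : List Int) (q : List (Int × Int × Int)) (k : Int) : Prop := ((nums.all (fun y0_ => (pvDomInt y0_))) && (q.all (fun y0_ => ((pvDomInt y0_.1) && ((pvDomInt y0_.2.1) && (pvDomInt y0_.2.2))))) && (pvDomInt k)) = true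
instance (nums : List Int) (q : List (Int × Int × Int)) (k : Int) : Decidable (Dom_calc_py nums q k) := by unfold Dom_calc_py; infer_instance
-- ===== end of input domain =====

-- B replaces A's size-(n+1) difference array by a sorted (position, delta) event list that is
-- swept in one merged pass with the nums scan (objective: alternative decomposition, same result).

-- ===== PORT A =====
-- diff[i] += v  (Python list-index semantics via PySem)
def pvUpd (d : List Int) (i v : Int) : List Int :=
  PySem.List.pySetD d i (PySem.List.pyGetD d i 0 + v)

-- A's second loop: for i in range(n): curr += diff[i]; if nums[i] > curr: return False
def pvASweep (nums diff : List Int) : List Int → Int → Bool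
  | [], _ => true
  | i :: rest, curr =>
    let c := curr + PySem.List.pyGetD diff i 0
    if PySem.List.pyGetD nums i 0 > c then false else pvASweep nums diff rest c

def calc_py (nums : List Int) (q : List (Int × Int × Int)) (k : Int) : Bool :=
  let n : Int := nums.length
  let diff := (PySem.List.pyRange 0 k 1).foldl (fun d i =>
      let t := PySem.List.pyGetD q i (0, 0, 0)
      let d := pvUpd d t.1 t.2.2
      pvUpd d (t.2.1 + 1) (-t.2.2)) (List.replicate (n + 1).toNat 0)
  pvASweep nums diff (PySem.List.pyRange 0 n 1) 0

-- ===== PORT B =====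
-- B's inner while: consume all pending events at positions ≤ i into curr
def pvConsume : List (Int × Int) → Int → Int → List (Int × Int) × Int
  | [], _, curr => ([], curr)
  | (p, dv) :: rest, i, curr =>
    if p ≤ i then pvConsume rest i (curr + dv) else ((p, dv) :: rest, curr)

-- B's main loop: for i, x in enumerate(nums), the event pointer kept as the remaining event list
def pvBSweep : List (Int × Int) → Int → Int → List Int → Bool
  | _, _, _, [] => true
  | evs, i, curr, x :: rest =>
    let s := pvConsume evs i curr
    if x > s.2 then false else pvBSweep s.1 (i + 1) s.2 rest

def calc_py_alt (nums : List Int) (q : List (Int × Int × Int)) (k : Int) : Bool :=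
  let events := (PySem.List.pyRange 0 k 1).foldl (fun acc i =>
      let t := PySem.List.pyGetD q i (0, 0, 0)
      acc ++ [(t.1, t.2.2), (t.2.1 + 1, -t.2.2)]) []
  let events := PySem.List.sorted events (fun e => e.1) false
  pvBSweep events 0 0 nums

-- ===== PRECONDITION & SPEC =====
-- Pre_ restricts to the task's natural domain: at most len(q) queries are used, and each of the
-- first k queries has in-bounds, non-negative endpoints.  It excludes k > len(q) (A raises
-- IndexError) and queries whose l or r+1 is out of [0, n]: those outside [-(n+1), n] make A raise
-- IndexError, while negative in-wrap-range ones make A silently wrap around the diff array — an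
-- artefact of Python negative indexing that B, which treats positions literally, does not reproduce.
def Pre_calc_py (nums : List Int) (q : List (Int × Int × Int)) (k : Int) : Prop :=
  k ≤ (q.length : Int) ∧
  ∀ t ∈ q.take k.toNat,
    0 ≤ t.1 ∧ t.1 ≤ (nums.length : Int) ∧ 0 ≤ t.2.1 + 1 ∧ t.2.1 + 1 ≤ (nums.length : Int)
instance (nums : List Int) (q : List (Int × Int × Int)) (k : Int) : Decidable (Pre_calc_py nums q k) := by
  unfold Pre_calc_py; infer_instance

def pvWitness_calc_py : List Int × (List (Int × Int × Int)) × Int := ([1, 2, 0], [(0, 1, 2), (1, 2, 1)], 2)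

def Spec_calc_py (nums : List Int) (q : List (Int × Int × Int)) (k : Int) (out : Bool) : Prop := out = calc_py_alt nums q k
instance (nums : List Int) (q : List (Int × Int × Int)) (k : Int) (out : Bool) : Decidable (Spec_calc_py nums q k out) := by unfold Spec_calc_py; infer_instance

-- ===== CLAIM (what is proved, stated in full; the proofs are below) =====
def Claim_equal_calc_py : Prop := ∀ (nums : List Int) (q : List (Int × Int × Int)) (k : Int), Dom_calc_py nums q k → Pre_calc_py nums q k → Spec_calc_py nums q k (calc_py nums q k)

-- ===== LEMMAS AND PROOFS =====

-- the common reference value: total increment covering index j contributed by the used queries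
def pvC (q' : List (Int × Int × Int)) (j : Int) : Int :=
  (q'.map (fun t => (if t.1 ≤ j then t.2.2 else 0) + (if t.2.1 + 1 ≤ j then -t.2.2 else 0))).sum

-- event-list running total: sum of the deltas of the events at positions ≤ m
def pvF (evs : List (Int × Int)) (m : Int) : Int :=
  ((evs.filter (fun e => decide (e.1 ≤ m))).map (fun e => e.2)).sum

-- one iteration of A's first loop, as a function of the query triple
def pvStep (d : List Int) (t : Int × Int × Int) : List Int :=
  pvUpd (pvUpd d t.1 t.2.2) (t.2.1 + 1) (-t.2.2)

theorem pvUpd_length (d : List Int) (i v : Int) : (pvUpd d i v).length = d.length := by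
  simp [pvUpd, PySem.List.length_pySetD]

theorem pvUpd_prefix_sum (d : List Int) (p v : Int) (j : Nat)
    (h0 : 0 ≤ p) (h1 : p.toNat < d.length) :
    ((pvUpd d p v).take (j + 1)).sum = (d.take (j + 1)).sum + (if p ≤ (j : Int) then v else 0) := by
  have hget : PySem.List.pyGetD d p 0 = d[p.toNat] := PySem.List.pyGetD_eq_getElem d (0:Int) h0 (by omega)
  have hset : pvUpd d p v = d.set p.toNat (d[p.toNat] + v) := by
    rw [pvUpd, PySem.List.pySetD_of_nonneg d _ h0, hget]
  set m := p.toNat with hm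
  rw [hset, List.take_set]
  by_cases hc : p ≤ (j : Int)
  · have hlt : m < (d.take (j+1)).length := by simp [List.length_take]; omega
    rw [List.sum_set, if_pos hlt]
    have hdecomp : (d.take (j+1)).sum = ((d.take (j+1)).take m).sum + (d.take (j+1))[m] + ((d.take (j+1)).drop (m+1)).sum := by
      conv_lhs => rw [← List.take_append_drop m (d.take (j+1))]
      rw [List.sum_append, List.drop_eq_getElem_cons hlt]
      simp; ring
    have hgm : (d.take (j+1))[m] = d[m]'h1 := by
      simp [List.getElem_take]
    rw [if_pos hc, hdecomp, hgm]; ring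
  · have : (d.take (j+1)).length ≤ m := by simp [List.length_take]; omega
    rw [List.set_eq_of_length_le this, if_neg hc, add_zero]

-- the diff list A builds: its length and its prefix sums (= the coverage values pvC)
theorem pvDiff_spec (q' : List (Int × Int × Int)) (n : Nat)
    (hb : ∀ t ∈ q', 0 ≤ t.1 ∧ t.1 ≤ (n : Int) ∧ 0 ≤ t.2.1 + 1 ∧ t.2.1 + 1 ≤ (n : Int)) :
    (q'.foldl pvStep (List.replicate (n + 1) 0)).length = n + 1 ∧
    ∀ j : Nat, ((q'.foldl pvStep (List.replicate (n + 1) 0)).take (j + 1)).sum = pvC q' (j : Int) := by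
  induction q' using List.reverseRecOn with
  | nil =>
    refine ⟨by simp, fun j => ?_⟩
    simp [pvC, List.take_replicate, List.sum_replicate]
  | append_singleton l t ih =>
    have hb' : ∀ t ∈ l, 0 ≤ t.1 ∧ t.1 ≤ (n : Int) ∧ 0 ≤ t.2.1 + 1 ∧ t.2.1 + 1 ≤ (n : Int) :=
      fun s hs => hb s (by simp [hs])
    obtain ⟨hlen, hpre⟩ := ih hb'
    obtain ⟨ht1, ht2, ht3, ht4⟩ := hb t (by simp)
    set d := l.foldl pvStep (List.replicate (n + 1) 0) with hd
    have h1 : t.1.toNat < d.length := by omega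
    have h2 : (t.2.1 + 1).toNat < (pvUpd d t.1 t.2.2).length := by
      rw [pvUpd_length]; omega
    constructor
    · rw [List.foldl_append]
      simp only [List.foldl_cons, List.foldl_nil, ← hd, pvStep, pvUpd_length]
      omega
    · intro j
      rw [List.foldl_append]
      simp only [List.foldl_cons, List.foldl_nil, ← hd, pvStep]
      rw [pvUpd_prefix_sum _ _ _ j ht3 h2, pvUpd_prefix_sum _ _ _ j ht1 h1, hpre j]
      simp only [pvC, List.map_append, List.sum_append]
      simp
      ring

-- 'for i in range(k): … q[i] …' is a fold over the first k queries
theorem pvFoldl_range_getD {α : Type} (xs : List (Int × Int × Int)) (f : α → (Int × Int × Int) → α) :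
    ∀ (m : Nat), m ≤ xs.length → ∀ (init : α),
      (List.range m).foldl (fun a i => f a (xs.getD i (0, 0, 0))) init = (xs.take m).foldl f init := by
  intro m
  induction m with
  | zero => intro _ init; simp
  | succ m ih =>
    intro hm init
    have hmx : m < xs.length := by omega
    rw [List.range_succ, List.foldl_append, ih (by omega) init, List.take_add_one,
        List.getElem?_eq_getElem hmx, List.foldl_append]
    simp [hmx]

theorem pvFoldl_bridge {α : Type} (q : List (Int × Int × Int)) (k : Int)
    (hk : k ≤ (q.length : Int)) (f : α → (Int × Int × Int) → α) (init : α) :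
    (PySem.List.pyRange 0 k 1).foldl (fun d i => f d (PySem.List.pyGetD q i (0, 0, 0))) init
      = (q.take k.toNat).foldl f init := by
  rw [PySem.List.pyRange_zero, List.foldl_map]
  simp only [PySem.List.pyGetD_natCast]
  exact pvFoldl_range_getD q f k.toNat (by omega) init

theorem pvASweep_eq (nums diff : List Int) (i : Nat) (curr : Int)
    (hd : diff.length = nums.length + 1) :
    pvASweep nums diff (PySem.List.pyRange (i : Int) (nums.length : Int) 1) curr
      = decide (∀ j : Nat, i ≤ j → j < nums.length →
          nums.getD j 0 ≤ curr + ((diff.take (j + 1)).sum - (diff.take i).sum)) := by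
  by_cases hin : i < nums.length
  case neg =>
    rw [PySem.List.pyRange_one_eq_nil (by omega), pvASweep]
    symm
    rw [decide_eq_true_iff]
    intro j h1 h2; omega
  case pos =>
    rw [PySem.List.pyRange_one_cons (by exact_mod_cast hin)]
    have hcast : (i : Int) + 1 = ((i + 1 : Nat) : Int) := by push_cast; ring
    rw [hcast, pvASweep]
    have hdi : i < diff.length := by omega
    have hgd : PySem.List.pyGetD diff (i : Int) 0 = diff[i] := by
      simp [PySem.List.pyGetD_natCast, hdi]
    have hstep : (diff.take (i + 1)).sum = (diff.take i).sum + diff[i] :=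
      List.sum_take_succ diff i hdi
    have hgn : PySem.List.pyGetD nums (i : Int) 0 = nums.getD i 0 := by
      simp [PySem.List.pyGetD_natCast]
    by_cases hx : PySem.List.pyGetD nums (i : Int) 0 > curr + PySem.List.pyGetD diff (i : Int) 0
    · rw [if_pos hx]
      symm
      rw [decide_eq_false_iff_not]
      intro hP
      have := hP i (le_refl i) hin
      rw [hgn, hgd] at hx
      omega
    · rw [if_neg hx, pvASweep_eq nums diff (i + 1) _ hd]
      apply decide_eq_decide.mpr
      rw [hgn, hgd] at hx
      constructor
      · intro hP j h1 h2
        rcases Nat.eq_or_lt_of_le h1 with h | h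
        · subst h; omega
        · have := hP j h h2; omega
      · intro hP j h1 h2
        have := hP j (by omega) h2; omega
termination_by nums.length - i
decreasing_by omega

theorem pvConsume_eq (evs : List (Int × Int)) (i curr : Int)
    (hs : evs.Pairwise (fun a b => a.1 ≤ b.1)) :
    pvConsume evs i curr = (evs.filter (fun e => decide (i < e.1)), curr + pvF evs i) := by
  induction evs generalizing curr with
  | nil => simp [pvConsume, pvF]
  | cons hd tl ih =>
    obtain ⟨p, dv⟩ := hd
    rw [List.pairwise_cons] at hs
    by_cases hp : p ≤ i
    · rw [pvConsume, if_pos hp, ih _ hs.2]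
      simp [pvF, hp, not_lt.mpr hp]
      ring
    · have hall : ∀ e ∈ tl, ¬ e.1 ≤ i := fun e he => by
        have := hs.1 e he; simp at this; omega
      rw [pvConsume, if_neg hp]
      have h1 : List.filter (fun e => decide (i < e.1)) tl = tl := by
        apply List.filter_eq_self.mpr; intro e he; simp; have := hall e he; omega
      have h2 : List.filter (fun e => decide (e.1 ≤ i)) tl = [] := by
        apply List.filter_eq_nil_iff.mpr; intro e he; simp; have := hall e he; omega
      simp [pvF, List.filter_cons, hp, h1, h2]

theorem pvF_split (evs : List (Int × Int)) (i m : Int) (h : i ≤ m) :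
    pvF evs m = pvF evs i + pvF (evs.filter (fun e => decide (i < e.1))) m := by
  induction evs with
  | nil => simp [pvF]
  | cons hd tl ih =>
    by_cases hp : hd.1 ≤ i
    · simp only [pvF, List.filter_cons] at *
      simp [hp, not_lt.mpr hp, le_trans hp h] at *
      omega
    · simp only [pvF, List.filter_cons] at *
      by_cases hm : hd.1 ≤ m
      · simp [hp, not_le.mp hp, hm] at *; omega
      · simp [hp, not_le.mp hp, hm] at *; omega

theorem pvBSweep_eq (xs : List Int) (evs : List (Int × Int)) (i curr : Int)
    (hs : evs.Pairwise (fun a b => a.1 ≤ b.1)) :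
    pvBSweep evs i curr xs
      = decide (∀ j : Nat, j < xs.length → xs.getD j 0 ≤ curr + pvF evs (i + j)) := by
  induction xs generalizing evs i curr with
  | nil => simp [pvBSweep]
  | cons x rest ih =>
    rw [pvBSweep]
    simp only [pvConsume_eq evs i curr hs]
    have hs' : (evs.filter (fun e => decide (i < e.1))).Pairwise (fun a b => a.1 ≤ b.1) :=
      List.Pairwise.filter _ hs
    by_cases hx : x > curr + pvF evs i
    · rw [if_pos hx]
      symm
      rw [decide_eq_false_iff_not]
      intro hP
      have := hP 0 (by simp)
      simp at this
      omega
    · rw [if_neg hx, ih _ _ _ hs']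
      apply decide_eq_decide.mpr
      constructor
      · intro hP j hj
        cases j with
        | zero => simpa using not_lt.mp hx
        | succ j' =>
          have h1 := hP j' (by simpa using hj)
          simp only [List.getD_cons_succ]
          have harg : i + ((j' + 1 : Nat) : Int) = i + 1 + (j' : Int) := by push_cast; ring
          rw [harg]
          have hsplit := pvF_split evs i (i + 1 + (j' : Int)) (by omega)
          omega
      · intro hP j hj
        have h1 := hP (j + 1) (by simpa using hj)
        simp only [List.getD_cons_succ] at h1
        have harg : i + ((j + 1 : Nat) : Int) = i + 1 + (j : Int) := by push_cast; ring
        rw [harg] at h1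
        have hsplit := pvF_split evs i (i + 1 + (j : Int)) (by omega)
        omega

theorem pvF_perm (evs evs' : List (Int × Int)) (h : evs.Perm evs') (m : Int) :
    pvF evs m = pvF evs' m := by
  unfold pvF
  exact List.Perm.sum_eq (List.Perm.map _ (List.Perm.filter _ h))

theorem pvF_append (as bs : List (Int × Int)) (m : Int) :
    pvF (as ++ bs) m = pvF as m + pvF bs m := by
  simp [pvF, List.filter_append]

theorem pvF_pair (a v b w j : Int) :
    pvF [(a, v), (b, w)] j = (if a ≤ j then v else 0) + (if b ≤ j then w else 0) := by
  by_cases h1 : a ≤ j <;> by_cases h2 : b ≤ j <;> simp [pvF, h1, h2]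

-- the event list B builds carries exactly the coverage values pvC
theorem pvF_flatMap (q' : List (Int × Int × Int)) (j : Int) :
    pvF (q'.flatMap (fun t => [(t.1, t.2.2), (t.2.1 + 1, -t.2.2)])) j = pvC q' j := by
  induction q' with
  | nil => simp [pvF, pvC]
  | cons t tl ih =>
    rw [List.flatMap_cons, pvF_append, pvF_pair, ih]
    simp [pvC]

-- ===== VERDICT (by name: the statement is the Claim_ definition above) =====
theorem calc_py_spec : Claim_equal_calc_py := by
  intro nums q k _ hpre
  obtain ⟨hk, hq⟩ := hpre
  unfold Spec_calc_py
  simp only [calc_py, calc_py_alt]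
  set n := nums.length with hn
  set q' := q.take k.toNat with hq'
  -- A side
  have htn : ((n : Int) + 1).toNat = n + 1 := by omega
  have hbridge := pvFoldl_bridge q k hk pvStep (List.replicate (n + 1) 0)
  rw [htn]
  have hbody : (fun (d : List Int) (i : Int) =>
      let t := PySem.List.pyGetD q i (0, 0, 0)
      let d := pvUpd d t.1 t.2.2
      pvUpd d (t.2.1 + 1) (-t.2.2))
      = (fun d i => pvStep d (PySem.List.pyGetD q i (0, 0, 0))) := rfl
  rw [hbody, hbridge]
  obtain ⟨hlen, hpre⟩ := pvDiff_spec q' n hq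
  have hA := pvASweep_eq nums (q'.foldl pvStep (List.replicate (n + 1) 0)) 0 0 (by rw [hlen, hn])
  simp only [Nat.cast_zero] at hA
  rw [hA]
  -- B side
  have hbodyB : (fun (acc : List (Int × Int)) (i : Int) =>
      let t := PySem.List.pyGetD q i (0, 0, 0)
      acc ++ [(t.1, t.2.2), (t.2.1 + 1, -t.2.2)])
      = (fun acc i => (fun (acc : List (Int × Int)) (t : Int × Int × Int) =>
          acc ++ [(t.1, t.2.2), (t.2.1 + 1, -t.2.2)]) acc (PySem.List.pyGetD q i (0, 0, 0))) := rfl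
  rw [hbodyB, pvFoldl_bridge q k hk (fun (acc : List (Int × Int)) (t : Int × Int × Int) => acc ++ [(t.1, t.2.2), (t.2.1 + 1, -t.2.2)]) ([] : List (Int × Int)), ← hq']
  have hev : q'.foldl (fun acc t => acc ++ [(t.1, t.2.2), (t.2.1 + 1, -t.2.2)]) []
      = q'.flatMap (fun t => [(t.1, t.2.2), (t.2.1 + 1, -t.2.2)]) := by
    rw [PySem.List.foldl_append_eq_flatMap]
    simp
  rw [hev]
  set E := q'.flatMap (fun t => [(t.1, t.2.2), (t.2.1 + 1, -t.2.2)]) with hE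
  have hsorted : (PySem.List.sorted E (fun e => e.1) false).Pairwise (fun a b => a.1 ≤ b.1) :=
    PySem.List.sorted_pairwise E _
  rw [pvBSweep_eq nums _ 0 0 hsorted]
  apply decide_eq_decide.mpr
  have hFv : ∀ j : Int, pvF (PySem.List.sorted E (fun e => e.1) false) j = pvC q' j := by
    intro j
    rw [pvF_perm _ E (PySem.List.sorted_perm E _ false) j, hE, pvF_flatMap]
  constructor
  · intro hP j hj
    have := hP j (by omega) hj
    rw [hpre j] at this
    rw [hFv ((0 : Int) + (j : Int))]
    simpa using this
  · intro hP j _ hj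
    have := hP j hj
    rw [hFv ((0 : Int) + (j : Int))] at this
    rw [hpre j]
    simpa using this
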